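-- pv_equiv track=rewrite | github.com/mathornton01/steer-framework | src/python-tests/ais-uniform-distribution/ais_uniform_distribution_test.py | t4_long_run
-- ===== SOURCE A (Python) =====
-- MAX_RUN_LENGTH = 33
--
-- def t4_long_run(segment):
--     max_run = 1
--     current_bit = segment[0]
--     run_length = 1
--     for i in range(1, len(segment)):
--         if segment[i] == current_bit:
--             run_length += 1
--         else:
--             if run_length > max_run:
--                 max_run = run_length
--             current_bit = segment[i]
--             run_length = 1
--     if run_length > max_run:
--         max_run = run_length
--     return max_run <= MAX_RUN_LENGTH
-- ===== SOURCE B (Python) =====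
-- MAX_RUN_LENGTH = 33
--
-- def t4_long_run(segment):
--     # groupby-style: split into maximal runs, then compare the max run length
--     runs = []
--     rest = segment
--     while rest:
--         run = 1
--         while run < len(rest) and rest[run] == rest[0]:
--             run += 1
--         runs.append(run)
--         rest = rest[run:]
--     return max(runs) <= MAX_RUN_LENGTH
-- ===== Notes on version B (the rewrite author's own statement) =====
-- stated objective: alternative
-- what changed: B splits the sequence into maximal runs with a groupby-style nested loop (inner scan to the run's end, then slice it off), builds the list of run lengths and compares max(runs) to the threshold, instead of A's single index loop maintaining running-max/current-bit/run-length state.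
import Mathlib
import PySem

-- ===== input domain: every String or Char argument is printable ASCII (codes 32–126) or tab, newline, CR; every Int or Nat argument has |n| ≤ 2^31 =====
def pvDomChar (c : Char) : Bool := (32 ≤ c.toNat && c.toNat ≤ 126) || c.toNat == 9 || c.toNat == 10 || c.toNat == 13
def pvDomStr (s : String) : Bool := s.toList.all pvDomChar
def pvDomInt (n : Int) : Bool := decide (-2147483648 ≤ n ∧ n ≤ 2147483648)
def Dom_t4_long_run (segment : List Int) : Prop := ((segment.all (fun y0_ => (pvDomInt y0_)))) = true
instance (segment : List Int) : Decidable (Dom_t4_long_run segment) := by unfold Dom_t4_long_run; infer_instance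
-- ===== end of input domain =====

-- B re-implements the check as a groupby-style decomposition into maximal runs
-- (list of run lengths, then max ≤ threshold) instead of A's single running-max pass;
-- objective: alternative. On [] both Pythons raise (IndexError / ValueError): excluded by Pre_.


-- ===== PORT A =====
-- for i in range(1, len(segment)) reading segment[i]; state (max_run, current_bit, run_length)
def t4_long_run (segment : List Int) : Bool :=
  let st := (PySem.List.pyRange 1 (PySem.List.len segment) 1).foldl
    (fun (st : Int × Int × Int) i =>
      if PySem.List.pyGetD segment i 0 = st.2.1 then (st.1, st.2.1, st.2.2 + 1)
      else (if st.1 < st.2.2 then st.2.2 else st.1, PySem.List.pyGetD segment i 0, 1))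
    (1, PySem.List.pyGetD segment 0 0, 1)
  -- segment[0] raises IndexError on []: excluded by Pre_; pyGetD's default is never observed there
  decide ((if st.1 < st.2.2 then st.2.2 else st.1) ≤ 33)

-- ===== PORT B =====
-- inner while: 'while run < len(rest) and rest[run] == rest[0]: run += 1'
def pvCount (xs : List Int) (k : Nat) : Nat :=
  if h : k < xs.length ∧ xs.getD k 0 = xs.getD 0 0 then pvCount xs (k + 1) else k
termination_by xs.length - k
decreasing_by omega

theorem le_pvCount (xs : List Int) (k : Nat) : k ≤ pvCount xs k := by
  unfold pvCount
  split
  · exact le_trans (Nat.le_succ k) (le_pvCount xs (k + 1))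
  · exact le_refl k
termination_by xs.length - k
decreasing_by rename_i h; omega

-- outer while: peel one maximal run off the front, collect its length
def pvRuns (rest : List Int) : List Int :=
  match rest with
  | [] => []
  | x :: xs =>
    let run := pvCount (x :: xs) 1
    (run : Int) :: pvRuns ((x :: xs).drop run)
termination_by rest.length
decreasing_by
  simp only [List.length_drop, List.length_cons]
  have := le_pvCount (x :: xs) 1
  omega

def t4_long_run_alt (segment : List Int) : Bool :=
  match PySem.List.max? (pvRuns segment) (fun y => y) with
  | some m => decide (m ≤ 33)
  | none => false   -- max([]) raises ValueError in Python: excluded by Pre_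

-- ===== PRECONDITION & SPEC =====
-- Pre_ excludes exactly the empty list, on which A raises IndexError (segment[0]).
def Pre_t4_long_run (segment : List Int) : Prop := segment ≠ []
instance (segment : List Int) : Decidable (Pre_t4_long_run segment) := by unfold Pre_t4_long_run; infer_instance
def pvWitness_t4_long_run : List Int := [0, 1, 1, 0]

def Spec_t4_long_run (segment : List Int) (out : Bool) : Prop := out = t4_long_run_alt segment
instance (segment : List Int) (out : Bool) : Decidable (Spec_t4_long_run segment out) := by unfold Spec_t4_long_run; infer_instance

-- ===== CLAIM (what is proved, stated in full; the proofs are below) =====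
def Claim_equal_t4_long_run : Prop := ∀ (segment : List Int), Dom_t4_long_run segment → Pre_t4_long_run segment → Spec_t4_long_run segment (t4_long_run segment)

-- ===== LEMMAS AND PROOFS =====

-- reference run-length decomposition, structural on the tail
def srunsAux (cur r : Int) : List Int → List Int
  | [] => [r]
  | x :: xs => if x = cur then srunsAux cur (r + 1) xs else r :: srunsAux x 1 xs

-- A's fold computes the running max over srunsAux
theorem foldA_eq (t : List Int) : ∀ (m cur r : Int),
    (let st := t.foldl
      (fun (st : Int × Int × Int) x =>
        if x = st.2.1 then (st.1, st.2.1, st.2.2 + 1)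
        else (if st.1 < st.2.2 then st.2.2 else st.1, x, 1)) (m, cur, r)
     if st.1 < st.2.2 then st.2.2 else st.1)
    = (srunsAux cur r t).foldl (fun a b => if a < b then b else a) m := by
  induction t with
  | nil => intro m cur r; simp [srunsAux]
  | cons x xs ih =>
    intro m cur r
    by_cases hx : x = cur
    · simp only [List.foldl_cons, srunsAux, hx, if_pos rfl]
      exact ih m cur (r + 1)
    · simp only [List.foldl_cons, srunsAux, if_neg hx]
      exact ih (if m < r then r else m) x 1

theorem pvCount_spec (n : Nat) : ∀ (t : List Int) (x : Int) (j : Nat), t.length - j ≤ n →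
    pvCount (x :: t) (j + 1) = j + 1 + ((t.drop j).takeWhile (fun y => decide (y = x))).length := by
  induction n with
  | zero =>
    intro t x j h
    have hj : t.length ≤ j := by omega
    rw [pvCount]
    rw [dif_neg (by simp; omega)]
    simp [List.drop_eq_nil_of_le hj]
  | succ n ih =>
    intro t x j h
    rw [pvCount]
    by_cases hj : j < t.length
    · have hdrop : t.drop j = t[j] :: t.drop (j + 1) := List.drop_eq_getElem_cons hj
      have hget : (x :: t).getD (j + 1) 0 = t[j] := by
        simp [List.getD, List.getElem?_eq_getElem hj]
      by_cases he : t[j] = x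
      · rw [dif_pos ⟨by simp only [List.length_cons]; omega,
          by rw [hget, he]; simp [List.getD]⟩]
        rw [ih t x (j + 1) (by omega)]
        rw [hdrop]
        simp [he]
        omega
      · rw [dif_neg (by rintro ⟨-, h2⟩; rw [hget] at h2; simp [List.getD] at h2; exact he h2)]
        rw [hdrop]
        simp [he]
    · rw [dif_neg (by simp; omega)]
      simp [List.drop_eq_nil_of_le (by omega : t.length ≤ j)]

theorem drop_takeWhile_length (p : Int → Bool) : ∀ (t : List Int),
    t.drop (t.takeWhile p).length = t.dropWhile p := by
  intro t
  induction t with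
  | nil => simp
  | cons a l ih =>
    by_cases h : p a
    · simp [List.takeWhile_cons, List.dropWhile_cons, h, ih]
    · simp [List.takeWhile_cons, List.dropWhile_cons, h]

-- srunsAux seen as: first run (r + leading count), then the runs of the remainder
theorem srunsAux_split : ∀ (t : List Int) (x r : Int),
    srunsAux x r t
    = (r + ((t.takeWhile (fun y => decide (y = x))).length : Int)) ::
      (match t.dropWhile (fun y => decide (y = x)) with
       | [] => []
       | y :: ys => srunsAux y 1 ys) := by
  intro t
  induction t with
  | nil => intro x r; simp [srunsAux]
  | cons z zs ih =>
    intro x r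
    by_cases hz : z = x
    · simp only [srunsAux, hz, List.takeWhile_cons, List.dropWhile_cons, decide_true,
        if_true, List.length_cons]
      rw [ih x (r + 1)]
      congr 1
      push_cast; ring
    · simp [srunsAux, hz, List.takeWhile_cons, List.dropWhile_cons]

theorem pvRuns_eq_aux (n : Nat) : ∀ (x : Int) (t : List Int), t.length ≤ n →
    pvRuns (x :: t) = srunsAux x 1 t := by
  induction n with
  | zero =>
    intro x t h
    have ht : t = [] := List.eq_nil_of_length_eq_zero (by omega)
    subst ht
    rw [pvRuns]
    rw [pvCount, dif_neg (by simp)]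
    simp [srunsAux, pvRuns]
  | succ n ih =>
    intro x t h
    rw [pvRuns]
    have hc : pvCount (x :: t) 1 = 1 + ((t.takeWhile (fun y => decide (y = x))).length) := by
      have := pvCount_spec t.length t x 0 (by omega)
      simpa using this
    rw [hc]
    have hdrop : (x :: t).drop (1 + (t.takeWhile (fun y => decide (y = x))).length)
        = t.dropWhile (fun y => decide (y = x)) := by
      rw [Nat.add_comm]
      simp only [List.drop_succ_cons]
      exact drop_takeWhile_length _ t
    rw [hdrop, srunsAux_split t x 1]
    rcases hsplit : t.dropWhile (fun y => decide (y = x)) with _ | ⟨y, ys⟩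
    · simp [pvRuns]
    · have hlen : ys.length ≤ n := by
        have := List.length_dropWhile_le (fun y => decide (y = x)) t
        rw [hsplit] at this
        simp at this
        omega
      rw [ih y ys hlen]
      simp

theorem pvRuns_eq (x : Int) (t : List Int) : pvRuns (x :: t) = srunsAux x 1 t :=
  pvRuns_eq_aux t.length x t (le_refl _)

theorem mx_eq_max : (fun (a b : Int) => if a < b then b else a) = max := by
  funext a b
  rcases lt_trichotomy a b with h | h | h <;> simp [max_def, *] <;> omega

theorem t4_long_run_spec : Claim_equal_t4_long_run := by
  intro segment _ hpre
  unfold Spec_t4_long_run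
  rcases segment with _ | ⟨h, t⟩
  · exact absurd rfl hpre
  unfold t4_long_run t4_long_run_alt
  rw [pvRuns_eq h t]
  have hfold : (PySem.List.pyRange 1 (PySem.List.len (h :: t)) 1).foldl
      (fun (st : Int × Int × Int) i =>
        if PySem.List.pyGetD (h :: t) i 0 = st.2.1 then (st.1, st.2.1, st.2.2 + 1)
        else (if st.1 < st.2.2 then st.2.2 else st.1, PySem.List.pyGetD (h :: t) i 0, 1))
      (1, PySem.List.pyGetD (h :: t) 0 0, 1)
      = t.foldl
      (fun (st : Int × Int × Int) x =>
        if x = st.2.1 then (st.1, st.2.1, st.2.2 + 1)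
        else (if st.1 < st.2.2 then st.2.2 else st.1, x, 1)) (1, h, 1) := by
    have := PySem.List.foldl_pyRange_pyGetD (xs := h :: t) (a := 1) (d := 0)
      (f := fun (st : Int × Int × Int) x =>
        if x = st.2.1 then (st.1, st.2.1, st.2.2 + 1)
        else (if st.1 < st.2.2 then st.2.2 else st.1, x, 1))
      (init := (1, PySem.List.pyGetD (h :: t) 0 0, 1)) (by omega)
    simpa [PySem.List.pyGetD_zero_cons] using this
  simp only [hfold]
  rw [foldA_eq t 1 h 1]
  rw [srunsAux_split t h 1]
  rw [PySem.List.max?_id_cons]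
  simp only [List.foldl_cons, mx_eq_max]
  have h1 : max 1 (1 + ((t.takeWhile fun y => decide (y = h)).length : Int))
      = 1 + ((t.takeWhile fun y => decide (y = h)).length : Int) := by
    have : (0 : Int) ≤ ((t.takeWhile fun y => decide (y = h)).length : Int) := Int.natCast_nonneg _
    omega
  rw [h1]

-- ===== VERDICT note: verdict theorem is t4_long_run_spec above =====
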